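-- pv_equiv track=rewrite | github.com/chuck-gcc/la-pleiade | atlas/TheRock/rocm-libraries/projects/rocfft/scripts/perf/perflib/utils.py | get_proc_grid
-- ===== SOURCE A (Python) =====
-- def get_proc_grid(bricks):
--     if not bricks:
--         return (1, 1, 1)
--     lowers = [b['lower'] for b in bricks]
--     grid_dims = []
--     for i in range(3):  # X, Y, Z
--         unique_coords = sorted(set(coord[i] for coord in lowers))
--         grid_dims.append(len(unique_coords))
--     return tuple(grid_dims)
-- ===== SOURCE B (Python) =====
-- def get_proc_grid(bricks):
--     if not bricks:
--         return (1, 1, 1)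
--     dims = []
--     for i in range(3):  # X, Y, Z
--         runs, prev = 0, None
--         for x in sorted(b['lower'][i] for b in bricks):
--             if x != prev:
--                 runs += 1
--             prev = x
--         dims.append(runs)
--     return tuple(dims)
-- ===== Notes on version B (the rewrite author's own statement) =====
-- stated objective: alternative
-- what changed: B counts distinct coordinates per axis without any set: it sorts the raw (multiset of) coordinates and counts value runs in one scan with a prev accumulator, instead of A's hash-set deduplication followed by a sort of the set.
import Mathlib
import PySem

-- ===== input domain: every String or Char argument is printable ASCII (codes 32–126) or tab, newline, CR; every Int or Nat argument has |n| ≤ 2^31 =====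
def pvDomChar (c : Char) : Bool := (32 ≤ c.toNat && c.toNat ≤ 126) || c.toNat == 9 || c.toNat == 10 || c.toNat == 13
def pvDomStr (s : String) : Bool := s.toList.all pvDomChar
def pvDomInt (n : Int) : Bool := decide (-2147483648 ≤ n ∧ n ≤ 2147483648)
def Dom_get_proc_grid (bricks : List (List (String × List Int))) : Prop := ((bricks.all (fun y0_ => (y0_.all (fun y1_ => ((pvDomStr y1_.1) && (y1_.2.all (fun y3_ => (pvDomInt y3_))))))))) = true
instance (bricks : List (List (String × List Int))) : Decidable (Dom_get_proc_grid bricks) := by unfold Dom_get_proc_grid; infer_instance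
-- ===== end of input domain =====

-- B counts distinct coordinates per axis with no set at all: it sorts the raw coordinate
-- multiset and counts value runs in one scan; A deduplicates into a set and sorts the set.

-- ===== PORT A =====
def get_proc_grid (bricks : List (List (String × List Int))) : Int × Int × Int :=
  if bricks = [] then (1, 1, 1)
  else
    let lowers := bricks.map (fun b => PySem.Dict.getD ⟨b⟩ "lower" [])
    let grid_dims := (PySem.List.pyRange 0 3 1).foldl
      (fun acc i =>
        acc ++ [PySem.List.len (PySem.List.sorted
          (PySem.Set.ofList (lowers.map (fun coord => PySem.List.pyGetD coord i 0)))
          (fun x => x) false)]) []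
    (PySem.List.pyGetD grid_dims 0 0, PySem.List.pyGetD grid_dims 1 0,
     PySem.List.pyGetD grid_dims 2 0)

-- ===== PORT B =====
def get_proc_grid_alt (bricks : List (List (String × List Int))) : Int × Int × Int :=
  if bricks = [] then (1, 1, 1)
  else
    let dims := (PySem.List.pyRange 0 3 1).foldl
      (fun dims i =>
        let st := (PySem.List.sorted
            (bricks.map (fun b =>
              PySem.List.pyGetD (PySem.Dict.getD ⟨b⟩ "lower" []) i 0))
            (fun x => x) false).foldl
          (fun (st : Int × Option Int) x =>
            (if some x ≠ st.2 then st.1 + 1 else st.1, some x)) (0, none)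
        dims ++ [st.1]) []
    (PySem.List.pyGetD dims 0 0, PySem.List.pyGetD dims 1 0,
     PySem.List.pyGetD dims 2 0)

-- ===== PRECONDITION & SPEC =====
-- Pre_ excludes exactly the inputs where Python A raises: a brick without a 'lower'
-- key (KeyError) or a 'lower' value with fewer than 3 coordinates (IndexError).
def Pre_get_proc_grid (bricks : List (List (String × List Int))) : Prop :=
  ∀ b ∈ bricks, (PySem.Dict.get? ⟨b⟩ "lower").isSome = true ∧
    3 ≤ ((PySem.Dict.get? ⟨b⟩ "lower").getD []).length
instance (bricks : List (List (String × List Int))) : Decidable (Pre_get_proc_grid bricks) := by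
  unfold Pre_get_proc_grid; infer_instance

def pvWitness_get_proc_grid : (List (List (String × List Int))) :=
  [[("lower", [0, 0, 0])], [("lower", [1, 0, 2])]]

def Spec_get_proc_grid (bricks : List (List (String × List Int))) (out : Int × Int × Int) : Prop := out = get_proc_grid_alt bricks
instance (bricks : List (List (String × List Int))) (out : Int × Int × Int) : Decidable (Spec_get_proc_grid bricks out) := by unfold Spec_get_proc_grid; infer_instance

-- ===== CLAIM (what is proved, stated in full; the proofs are below) =====
def Claim_equal_get_proc_grid : Prop := ∀ (bricks : List (List (String × List Int))), Dom_get_proc_grid bricks → Pre_get_proc_grid bricks → Spec_get_proc_grid bricks (get_proc_grid bricks)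

-- ===== LEMMAS AND PROOFS =====

-- The run-counting fold over a ≤-sorted list, started at count r with last-seen value p
-- (p below every element), counts the distinct values not equal to p.
theorem runFold_sorted (l : List Int) (r : Int) (p : Option Int)
    (hs : l.Pairwise (· ≤ ·))
    (hp : ∀ q, p = some q → ∀ x ∈ l, q ≤ x) :
    (l.foldl (fun (st : Int × Option Int) x =>
        (if some x ≠ st.2 then st.1 + 1 else st.1, some x)) (r, p)).1
    = r + ((l.toFinset \ (p.elim ∅ (fun q => {q}))).card : Int) := by
  induction l generalizing r p with
  | nil => simp
  | cons a t ih =>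
    rcases hs with _ | ⟨ha, hs'⟩
    by_cases hpa : p = some a
    · subst hpa
      simp only [List.foldl_cons]
      rw [if_neg (fun h => h rfl)]
      rw [ih r (some a) hs' (by intro q hq x hx; cases hq; exact ha x hx)]
      congr 2
      simp only [List.toFinset_cons, Option.elim]
      rw [Finset.insert_sdiff_of_mem _ (Finset.mem_singleton_self a)]
    · have hstep : (if some a ≠ p then r + 1 else r) = r + 1 := if_pos (by
        intro h; exact hpa h.symm)
      simp only [List.foldl_cons, hstep]
      rw [ih (r + 1) (some a) hs' (by intro q hq x hx; cases hq; exact ha x hx)]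
      have hkey : ((a :: t).toFinset \ (p.elim ∅ (fun q => {q}))).card
          = (t.toFinset \ ({a} : Finset Int)).card + 1 := by
        have hnotp : a ∉ (p.elim ∅ (fun q => {q}) : Finset Int) := by
          cases p with
          | none => simp
          | some q => simp only [Option.elim, Finset.mem_singleton]; intro h; exact hpa (by rw [h])
        have hqnott : (t.toFinset \ (p.elim ∅ (fun q => {q}))) = t.toFinset := by
          cases p with
          | none => simp
          | some q =>
            have hq : q ≤ a := hp q rfl a (List.mem_cons_self ..)
            have hqa : q ≠ a := fun h => hpa (by rw [h])
            apply Finset.sdiff_eq_self_of_disjoint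
            simp only [Option.elim, Finset.disjoint_singleton_right, List.mem_toFinset]
            intro hqt
            exact absurd (le_antisymm hq (ha q hqt)) hqa
        rw [List.toFinset_cons, Finset.insert_sdiff_of_notMem _ hnotp, hqnott,
          Finset.sdiff_singleton_eq_erase]
        have : insert a t.toFinset = insert a (t.toFinset.erase a) := by
          ext x; simp [Finset.mem_erase]; tauto
        rw [this, Finset.card_insert_of_notMem (Finset.notMem_erase a _)]
      rw [hkey]
      simp only [Option.elim]
      push_cast
      ring

-- Per axis: B's sort-and-count-runs over the raw coordinates equals A's
-- len(sorted(set(coords))).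
theorem axis_eq (coords : List Int) :
    ((PySem.List.sorted coords (fun x => x) false).foldl
        (fun (st : Int × Option Int) x =>
          (if some x ≠ st.2 then st.1 + 1 else st.1, some x)) (0, none)).1
    = PySem.List.len (PySem.List.sorted (PySem.Set.ofList coords) (fun x => x) false) := by
  rw [runFold_sorted _ 0 none (PySem.List.sorted_pairwise coords (fun x => x))
    (by intro q hq; cases hq)]
  have h1 : (PySem.List.sorted coords (fun x => x) false).toFinset = coords.toFinset :=
    List.toFinset_eq_of_perm _ _ (PySem.List.sorted_perm coords (fun x => x) false)
  have h2 : (PySem.Set.ofList coords).toFinset = coords.toFinset := by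
    ext x; simp [PySem.Set.mem_ofList]
  have h3 : (PySem.Set.ofList coords).length = (PySem.Set.ofList coords).toFinset.card :=
    (List.toFinset_card_of_nodup (PySem.Set.nodup_ofList coords)).symm
  simp [PySem.List.len_eq, PySem.List.length_sorted, h1, h2, h3]

-- ===== VERDICT (by name: the statement is the Claim_ definition above) =====
theorem get_proc_grid_spec : Claim_equal_get_proc_grid := by
  intro bricks _ _
  unfold Spec_get_proc_grid get_proc_grid get_proc_grid_alt
  by_cases h : bricks = []
  · simp [h]
  · simp only [if_neg h]
    have hr : PySem.List.pyRange 0 3 1 = [0, 1, 2] := by decide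
    simp only [hr, List.foldl_cons, List.foldl_nil, List.map_map, Function.comp_def]
    rw [axis_eq, axis_eq, axis_eq]
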